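-- pv_equiv track=rewrite | github.com/coke05288/Algorithm-Python | Implementation/Baekjoon-22859-HTML파싱.py | find_tag
-- ===== SOURCE A (Python) =====
-- def find_tag(html):
--     starts = []
--     ends = []
--
--     for i in range(len(html)):
--         if html[i] == '<':
--             starts.append(i)
--         elif html[i] == '>':
--             ends.append(i)
--
--     return (starts, ends)
-- ===== SOURCE B (Python) =====
-- def find_tag(html):
--     def positions(ch):
--         out = []
--         pos = 0
--         while True:
--             i = html.find(ch, pos)
--             if i == -1:
--                 break
--             out.append(i)
--             pos = i + 1
--         return out
--
--     return (positions('<'), positions('>'))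
-- ===== Notes on version B (the rewrite author's own statement) =====
-- stated objective: faster
-- what changed: Replaces the single per-character Python-level scan with interleaved if/elif appends by two driver loops that delegate scanning to str.find, each collecting one index list.
import Mathlib
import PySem

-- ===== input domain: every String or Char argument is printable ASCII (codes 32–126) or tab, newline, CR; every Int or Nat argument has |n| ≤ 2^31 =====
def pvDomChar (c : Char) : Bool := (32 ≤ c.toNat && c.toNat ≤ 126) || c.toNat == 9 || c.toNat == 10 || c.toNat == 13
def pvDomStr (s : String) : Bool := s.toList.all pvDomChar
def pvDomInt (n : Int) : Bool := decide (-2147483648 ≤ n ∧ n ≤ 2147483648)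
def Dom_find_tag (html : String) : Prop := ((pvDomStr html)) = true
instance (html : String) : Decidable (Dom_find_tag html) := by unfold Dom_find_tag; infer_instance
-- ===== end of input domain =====

-- B replaces A's single per-character scan (interleaved if/elif appends) by two
-- driver loops that delegate scanning to str.find; same O(n), measured faster by constant factor.

-- ===== PORT A =====
def find_tag (html : String) : List Int × List Int :=
  (PySem.List.pyRange 0 (PySem.Str.len html) 1).foldl
    (fun (st : List Int × List Int) i =>
      if PySem.Str.pyGet? html i = some '<' then (st.1 ++ [i], st.2)
      else if PySem.Str.pyGet? html i = some '>' then (st.1, st.2 ++ [i])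
      else st)
    ([], [])

-- ===== PORT B =====
-- termination fact for the `while True: i = html.find(ch, pos)` loop: a hit lies in [pos, len)
theorem pvFindFrom_bounds (cs : List Char) (c : Char) (pos : Nat) (h : pos ≤ cs.length)
    (hne : PySem.Chars.findFrom cs [c] (pos : Int) none ≠ -1) :
    pos ≤ (PySem.Chars.findFrom cs [c] (pos : Int) none).toNat ∧
      (PySem.Chars.findFrom cs [c] (pos : Int) none).toNat < cs.length := by
  obtain ⟨h1, h2, -⟩ := PySem.Chars.findFrom_natCast_spec cs [c] pos h hne
  have hd : cs.drop (PySem.Chars.findFrom cs [c] (pos : Int) none).toNat ≠ [] := by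
    intro hnil; rw [hnil] at h2; exact (List.cons_ne_nil _ _) (List.prefix_nil.mp h2)
  have hlt : ¬ cs.length ≤ (PySem.Chars.findFrom cs [c] (pos : Int) none).toNat := by
    intro hle; exact hd (List.drop_eq_nil_iff.mpr hle)
  omega

-- Source B's inner `positions(ch)` loop (html kept as its character list; ch a single char)
def pvPositions (cs : List Char) (c : Char) (pos : Nat) (h : pos ≤ cs.length)
    (out : List Int) : List Int :=
  let i := PySem.Chars.findFrom cs [c] (pos : Int) none
  if hne : i = -1 then out
  else pvPositions cs c (i.toNat + 1)
        (by have := pvFindFrom_bounds cs c pos h hne; omega) (out ++ [i])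
termination_by cs.length - pos
decreasing_by have := pvFindFrom_bounds cs c pos h hne; omega

def find_tag_alt (html : String) : List Int × List Int :=
  (pvPositions html.toList '<' 0 (Nat.zero_le _) [],
   pvPositions html.toList '>' 0 (Nat.zero_le _) [])

-- ===== PRECONDITION & SPEC =====
def Spec_find_tag (html : String) (out : List Int × List Int) : Prop := out = find_tag_alt html
instance (html : String) (out : List Int × List Int) : Decidable (Spec_find_tag html out) := by unfold Spec_find_tag; infer_instance

-- ===== CLAIM (what is proved, stated in full; the proofs are below) =====
def Claim_equal_find_tag : Prop := ∀ (html : String), Dom_find_tag html → Spec_find_tag html (find_tag html)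

-- ===== LEMMAS AND PROOFS =====

-- the indices k ∈ [pos, len) with cs[k] = c, as Ints, in increasing order
def pvOcc (cs : List Char) (c : Char) (pos : Nat) : List Int :=
  List.map (fun (k : Nat) => (k : Int))
    ((List.range' pos (cs.length - pos)).filter (fun k => cs[k]? = some c))

lemma pvOcc_empty (cs : List Char) (c : Char) (pos : Nat)
    (hno : ∀ k, pos ≤ k → k < cs.length → cs[k]? ≠ some c) : pvOcc cs c pos = [] := by
  have hf : (List.range' pos (cs.length - pos)).filter (fun k => cs[k]? = some c) = [] := by
    rw [List.filter_eq_nil_iff]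
    intro k hk
    have := List.mem_range'_1.mp hk
    simpa using hno k this.1 (by omega)
  simp [pvOcc, hf]

lemma pvOcc_cons (cs : List Char) (c : Char) (pos t : Nat)
    (hpt : pos ≤ t) (ht : t < cs.length) (hc : cs[t]? = some c)
    (hmin : ∀ k, pos ≤ k → k < t → cs[k]? ≠ some c) :
    pvOcc cs c pos = (t : Int) :: pvOcc cs c (t + 1) := by
  unfold pvOcc
  have hsplit : List.range' pos (cs.length - pos)
      = List.range' pos (t - pos) ++ List.range' t (cs.length - t) := by
    have h := @List.range'_append pos (t - pos) (cs.length - t) 1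
    rw [one_mul, show pos + (t - pos) = t by omega,
      show (t - pos) + (cs.length - t) = cs.length - pos by omega] at h
    exact h.symm
  rw [hsplit, List.filter_append]
  have h1 : (List.range' pos (t - pos)).filter (fun k => cs[k]? = some c) = [] := by
    rw [List.filter_eq_nil_iff]
    intro k hk
    have := List.mem_range'_1.mp hk
    simpa using hmin k this.1 (by omega)
  have h2 : List.range' t (cs.length - t) = t :: List.range' (t + 1) (cs.length - (t + 1)) := by
    rw [show cs.length - t = (cs.length - (t + 1)) + 1 by omega, List.range'_succ]
  rw [h1, h2]
  simp [hc]

lemma prefix_singleton_drop (cs : List Char) (c : Char) (k : Nat) :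
    [c] <+: cs.drop k ↔ cs[k]? = some c := by
  constructor
  · rintro ⟨rest, hrest⟩
    have : (cs.drop k)[0]? = some c := by rw [← hrest]; simp
    simpa [List.getElem?_drop] using this
  · intro hk
    have : (cs.drop k)[0]? = some c := by simpa [List.getElem?_drop] using hk
    cases hd : cs.drop k with
    | nil => simp [hd] at this
    | cons x xs =>
      rw [hd] at this; simp at this
      exact ⟨xs, by simp [this]⟩

lemma pvPositions_eq (cs : List Char) (c : Char) (pos : Nat) (h : pos ≤ cs.length)
    (out : List Int) : pvPositions cs c pos h out = out ++ pvOcc cs c pos := by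
  rw [pvPositions]
  by_cases hne : PySem.Chars.findFrom cs [c] (pos : Int) none = -1
  · simp only [hne, dif_pos]
    rw [pvOcc_empty cs c pos, List.append_nil]
    intro k hk1 hk2 hkc
    have hnin := (PySem.Chars.findFrom_natCast_eq_neg_one_iff cs [c] pos h).mp hne
    have hmem : c ∈ cs.drop pos := by
      have : (cs.drop pos)[k - pos]? = some c := by
        rw [List.getElem?_drop, show pos + (k - pos) = k by omega]; exact hkc
      exact List.mem_of_getElem? this
    obtain ⟨u, v, huv⟩ := List.mem_iff_append.mp hmem
    exact hnin ⟨u, v, by rw [huv]; simp⟩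
  · simp only [hne, dif_neg, not_false_iff]
    obtain ⟨hge, hpre, hmin⟩ := PySem.Chars.findFrom_natCast_spec cs [c] pos h hne
    obtain ⟨hpt, htlt⟩ := pvFindFrom_bounds cs c pos h hne
    set t := (PySem.Chars.findFrom cs [c] (pos : Int) none).toNat with hT
    rw [pvPositions_eq cs c (t + 1) (by omega) (out ++ [PySem.Chars.findFrom cs [c] (pos : Int) none])]
    rw [pvOcc_cons cs c pos t hpt htlt ((prefix_singleton_drop cs c t).mp hpre)
      (fun k hk1 hk2 hkc => hmin k hk1 hk2 ((prefix_singleton_drop cs c k).mpr hkc))]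
    have hit : PySem.Chars.findFrom cs [c] (pos : Int) none = (t : Int) := by
      rw [hT]; omega
    rw [hit]; simp
termination_by cs.length - pos
decreasing_by omega

lemma pvFoldA (cs : List Char) (n : Nat) (hn : n ≤ cs.length) (s e : List Int) :
    (PySem.List.pyRange 0 (n : Int) 1).foldl
      (fun (st : List Int × List Int) i =>
        if PySem.List.pyGet? cs i = some '<' then (st.1 ++ [i], st.2)
        else if PySem.List.pyGet? cs i = some '>' then (st.1, st.2 ++ [i])
        else st) (s, e)
    = (s ++ List.map (fun (k : Nat) => (k : Int)) ((List.range n).filter (fun k => cs[k]? = some '<')),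
       e ++ List.map (fun (k : Nat) => (k : Int)) ((List.range n).filter (fun k => cs[k]? = some '>'))) := by
  induction n generalizing s e with
  | zero => simp [PySem.List.pyRange_one_eq_nil]
  | succ m ih =>
    rw [show ((m + 1 : Nat) : Int) = (m : Int) + 1 by push_cast; ring,
      PySem.List.pyRange_one_succ_right (by positivity), List.foldl_append,
      ih (by omega)]
    simp only [List.foldl_cons, List.foldl_nil, List.range_succ, List.filter_append,
      List.map_append, PySem.List.pyGet?_natCast]
    by_cases h1 : cs[m]? = some '<'
    · simp [h1]
    · by_cases h2 : cs[m]? = some '>'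
      · simp [h2]
      · simp [h1, h2]

lemma range_filter_eq_occ (cs : List Char) (c : Char) :
    List.map (fun (k : Nat) => (k : Int)) ((List.range cs.length).filter (fun k => cs[k]? = some c))
      = pvOcc cs c 0 := by
  unfold pvOcc
  rw [List.range_eq_range', Nat.sub_zero]

-- ===== VERDICT (by name: the statement is the Claim_ definition above) =====
theorem find_tag_spec : Claim_equal_find_tag := by
  intro html _
  unfold Spec_find_tag find_tag find_tag_alt
  rw [pvPositions_eq, pvPositions_eq]
  have := pvFoldA html.toList html.toList.length (le_refl _) [] []
  simp only [List.nil_append] at this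
  simp only [PySem.Str.len_eq]
  -- Str.pyGet? on html is List.pyGet? on html.toList
  rw [show (fun (st : List Int × List Int) i =>
      if PySem.Str.pyGet? html i = some '<' then (st.1 ++ [i], st.2)
      else if PySem.Str.pyGet? html i = some '>' then (st.1, st.2 ++ [i])
      else st) = (fun (st : List Int × List Int) i =>
      if PySem.List.pyGet? html.toList i = some '<' then (st.1 ++ [i], st.2)
      else if PySem.List.pyGet? html.toList i = some '>' then (st.1, st.2 ++ [i])
      else st) from by funext st i; rfl]
  rw [this, range_filter_eq_occ, range_filter_eq_occ]
  simp
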